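-- pv_equiv track=rewrite | github.com/ShawnFrost23/COMP9318-21T1 | Lab2_specs/submission.py | checkAllInArray
-- ===== SOURCE A (Python) =====
-- def checkAllInArray(array1, arrayOrg):
--
--     arrayLen = len(array1) - 1
--     while arrayLen >= 0:
--         if array1[arrayLen] != 'ALL':
--             array1[arrayLen] = 'ALL'
--             return True
--         else:
--             array1[arrayLen] = arrayOrg[arrayLen]
--
--         arrayLen -= 1
--
--     return False
-- ===== SOURCE B (Python) =====
-- def checkAllInArray(array1, arrayOrg):
--     # One forward pass records the last index still holding a non-'ALL' value;
--     # the tail after it is then restored in bulk by a single slice assignment.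
--     j = -1
--     for i in range(len(array1)):
--         if array1[i] != 'ALL':
--             j = i
--     array1[j + 1:] = arrayOrg[j + 1:len(array1)]
--     if j < 0:
--         return False
--     array1[j] = 'ALL'
--     return True
-- ===== Notes on version B (the rewrite author's own statement) =====
-- stated objective: alternative
-- what changed: B replaces A's early-returning backward while-loop by a forward pass that accumulates the last non-'ALL' index, followed by one bulk slice assignment restoring the tail; the result is whether that accumulator was ever set.
import Mathlib
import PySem

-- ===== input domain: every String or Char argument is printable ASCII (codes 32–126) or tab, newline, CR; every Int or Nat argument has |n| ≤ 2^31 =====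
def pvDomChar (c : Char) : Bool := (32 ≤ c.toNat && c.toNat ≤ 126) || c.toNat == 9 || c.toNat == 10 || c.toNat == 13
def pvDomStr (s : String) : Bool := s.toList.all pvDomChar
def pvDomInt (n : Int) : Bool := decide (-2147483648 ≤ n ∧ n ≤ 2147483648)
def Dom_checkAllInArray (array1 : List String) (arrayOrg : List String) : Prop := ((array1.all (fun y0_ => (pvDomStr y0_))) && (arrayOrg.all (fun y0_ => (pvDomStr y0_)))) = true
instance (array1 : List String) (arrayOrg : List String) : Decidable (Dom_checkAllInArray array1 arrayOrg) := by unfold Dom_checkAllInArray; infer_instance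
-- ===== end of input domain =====

-- B replaces A's early-returning backward while-loop by a forward accumulator pass plus one
-- bulk slice assignment (alternative decomposition, same cost). Both Pythons mutate array1
-- identically on Pre_; the equivalence proved here is about the RETURN value only.

-- ===== PORT A =====
-- A's while-loop, index arrayLen = k-1 counting down; the in-place writes are carried as
-- successive List.set (writes happen at the current index only, reads of array1 at k are in
-- range, the read arrayOrg[k] is in range under Pre_, so getD is exact there).
def checkAllInArrayLoop (a : List String) (o : List String) : Nat → Bool
  | 0 => false
  | k+1 =>
    if (a.getD k "") ≠ "ALL" then true
    else checkAllInArrayLoop (a.set k (o.getD k "")) o k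

def checkAllInArray (array1 : List String) (arrayOrg : List String) : Bool :=
  checkAllInArrayLoop array1 arrayOrg array1.length

-- ===== PORT B =====
-- B's forward for-loop accumulating j = last index with a non-'ALL' entry (j starts at -1);
-- the slice assignment is pure mutation and does not affect the return value, which is
-- False iff j stayed -1.
def checkAllInArray_alt (array1 : List String) (arrayOrg : List String) : Bool :=
  let j : Int := (List.range array1.length).foldl
      (fun j i => if (array1.getD i "") ≠ "ALL" then (i : Int) else j) (-1)
  if j < 0 then false else true

-- ===== PRECONDITION & SPEC =====
-- Pre_ excludes exactly the inputs on which Python A raises IndexError: when the last element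
-- of array1 is 'ALL', A immediately reads arrayOrg[len(array1)-1], so arrayOrg must be at
-- least as long as array1 (all further reads are at smaller indices).
def Pre_checkAllInArray (array1 : List String) (arrayOrg : List String) : Prop :=
  array1 = [] ∨ array1.getLast? ≠ some "ALL" ∨ array1.length ≤ arrayOrg.length
instance (array1 : List String) (arrayOrg : List String) : Decidable (Pre_checkAllInArray array1 arrayOrg) := by unfold Pre_checkAllInArray; infer_instance
def pvWitness_checkAllInArray : List String × List String := (["x", "ALL"], ["a", "b"])

def Spec_checkAllInArray (array1 : List String) (arrayOrg : List String) (out : Bool) : Prop := out = checkAllInArray_alt array1 arrayOrg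
instance (array1 : List String) (arrayOrg : List String) (out : Bool) : Decidable (Spec_checkAllInArray array1 arrayOrg out) := by unfold Spec_checkAllInArray; infer_instance

-- ===== CLAIM (what is proved, stated in full; the proofs are below) =====
def Claim_equal_checkAllInArray : Prop := ∀ (array1 : List String) (arrayOrg : List String), Dom_checkAllInArray array1 arrayOrg → Pre_checkAllInArray array1 arrayOrg → Spec_checkAllInArray array1 arrayOrg (checkAllInArray array1 arrayOrg)

-- ===== LEMMAS AND PROOFS =====

-- A's loop returns true iff some of the first k entries of the CURRENT array is not 'ALL';
-- the writes it performs along the way only touch the index it is currently leaving.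
theorem loopA_true (o : List String) :
    ∀ (k : Nat) (a : List String),
      checkAllInArrayLoop a o k = true ↔ ∃ i < k, a.getD i "" ≠ "ALL" := by
  intro k
  induction k with
  | zero => intro a; simp [checkAllInArrayLoop]
  | succ k ih =>
    intro a
    by_cases h : (a.getD k "") = "ALL"
    · have h' : a[k]?.getD "" = "ALL" := by rw [List.getD] at h; exact h
      have hstep : checkAllInArrayLoop a o (k+1)
          = checkAllInArrayLoop (a.set k (o.getD k "")) o k := by
        simp [checkAllInArrayLoop, List.getD, h']
      rw [hstep, ih]
      constructor
      · rintro ⟨i, hik, hi⟩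
        refine ⟨i, by omega, ?_⟩
        rwa [List.getD, List.getElem?_set_ne (by omega : k ≠ i)] at hi
      · rintro ⟨i, hik, hi⟩
        have hik' : i < k := by
          rcases Nat.lt_succ_iff_lt_or_eq.mp hik with h' | h'
          · exact h'
          · subst h'; exact absurd h hi
        refine ⟨i, hik', ?_⟩
        rwa [List.getD, List.getElem?_set_ne (by omega : k ≠ i)]
    · constructor
      · intro _; exact ⟨k, by omega, h⟩
      · intro _
        have h' : ¬ a[k]?.getD "" = "ALL" := by rw [List.getD] at h; exact h
        simp [checkAllInArrayLoop, List.getD, h']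

-- B's accumulator stays < 0 iff every scanned index holds 'ALL' and it started < 0
-- (the indices written into it are naturals, hence ≥ 0).
theorem foldB_lt_zero (a : List String) :
    ∀ (l : List Nat) (j : Int),
      ((l.foldl (fun j i => if (a.getD i "") ≠ "ALL" then (i : Int) else j) j) < 0)
        ↔ ((∀ i ∈ l, a.getD i "" = "ALL") ∧ j < 0) := by
  intro l
  induction l with
  | nil => intro j; simp
  | cons x xs ih =>
    intro j
    simp only [List.foldl_cons]
    by_cases h : (a.getD x "") = "ALL"
    · have h' : a[x]?.getD "" = "ALL" := by rw [List.getD] at h; exact h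
      rw [if_neg (by simp [List.getD, h']), ih]
      simp [List.getD, h']
    · rw [if_pos h, ih]
      constructor
      · rintro ⟨_, hx⟩; exfalso; omega
      · rintro ⟨hall, _⟩; exact absurd (hall x (by simp)) h

-- ===== VERDICT (by name: the statement is the Claim_ definition above) =====
theorem checkAllInArray_spec : Claim_equal_checkAllInArray := by
  intro array1 arrayOrg _ _
  unfold Spec_checkAllInArray checkAllInArray checkAllInArray_alt
  by_cases h : ∃ i < array1.length, array1.getD i "" ≠ "ALL"
  · rw [(loopA_true arrayOrg array1.length array1).mpr h]
    rw [if_neg]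
    rw [foldB_lt_zero]
    rintro ⟨hall, _⟩
    obtain ⟨i, hik, hi⟩ := h
    exact hi (hall i (List.mem_range.mpr hik))
  · have h1 : checkAllInArrayLoop array1 arrayOrg array1.length = false :=
      Bool.eq_false_iff.mpr (fun ht => h ((loopA_true arrayOrg array1.length array1).mp ht))
    rw [h1, if_pos]
    rw [foldB_lt_zero]
    refine ⟨fun i hi => ?_, by norm_num⟩
    by_contra hne
    exact h ⟨i, List.mem_range.mp hi, hne⟩
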